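-- pv_equiv track=rewrite | github.com/cdsnlab/AIoTVirt | trajectoryanalysis/draw_final_graph.py | createsheetname
-- ===== SOURCE A (Python) =====
-- def createsheetname(variable):
--     transitionmodels = ["conv_lstm"]
--     timemodels = ["ResNet", "dt", "rf"]
--     vls = [15, 30]
--     preprocessingmethods = ["last", "ed"]
--     shnames = []
--     if variable == "timemodels":
--         for i in timemodels:
--             shnames.append(transitionmodels[0]+"_"+i+"_"+str(vls[0])+"_"+preprocessingmethods[0])
--     elif variable =="transitionmodels":
--         for i in transitionmodels:
--             shnames.append(i+"_"+timemodels[0]+"_"+str(vls[0])+"_"+preprocessingmethods[0])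
--     elif variable =="vls":
--         for i in vls:
--             shnames.append(transitionmodels[0]+"_"+timemodels[0]+"_"+str(i)+"_"+preprocessingmethods[0])
--     elif variable =="preprocessingmethods":
--         for i in preprocessingmethods:
--             shnames.append(transitionmodels[0]+"_"+timemodels[0]+"_"+str(vls[0])+"_"+i)
--
--     return shnames
-- ===== SOURCE B (Python) =====
-- def createsheetname(variable):
--     options = {
--         "transitionmodels": ["conv_lstm"],
--         "timemodels": ["ResNet", "dt", "rf"],
--         "vls": ["15", "30"],
--         "preprocessingmethods": ["last", "ed"],
--     }
--     if variable not in options: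
--         return []
--     order = ["transitionmodels", "timemodels", "vls", "preprocessingmethods"]
--     return ["_".join(opt if k == variable else options[k][0] for k in order)
--             for opt in options[variable]]
-- ===== Notes on version B (the rewrite author's own statement) =====
-- stated objective: simpler
-- what changed: Replaced the four near-identical if/elif branches (each hand-building names with + concatenation) by one table of option lists plus a single parametrized comprehension that joins the four slots, substituting the varying slot.
import Mathlib
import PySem

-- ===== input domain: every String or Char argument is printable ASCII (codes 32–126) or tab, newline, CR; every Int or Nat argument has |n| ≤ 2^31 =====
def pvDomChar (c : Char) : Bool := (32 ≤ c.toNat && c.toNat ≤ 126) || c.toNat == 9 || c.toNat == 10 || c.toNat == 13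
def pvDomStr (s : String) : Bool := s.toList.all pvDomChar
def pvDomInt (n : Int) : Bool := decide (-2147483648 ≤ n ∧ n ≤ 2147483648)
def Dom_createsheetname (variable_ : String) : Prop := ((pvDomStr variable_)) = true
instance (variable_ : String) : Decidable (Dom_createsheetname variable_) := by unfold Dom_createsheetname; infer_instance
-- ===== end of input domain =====

-- B replaces A's four near-identical if/elif branches by one option table plus a single
-- parametrized join loop (objective: simpler).

-- ===== PORT A =====
def createsheetname (variable_ : String) : List String :=
  let transitionmodels : List String := ["conv_lstm"]
  let timemodels : List String := ["ResNet", "dt", "rf"]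
  let vls : List Int := [15, 30]
  let preprocessingmethods : List String := ["last", "ed"]
  let shnames : List String := []
  if variable_ = "timemodels" then
    timemodels.foldl (fun acc i =>
      acc ++ [PySem.Str.join "" [transitionmodels[0]!, "_", i, "_", PySem.Int.toStr vls[0]!, "_", preprocessingmethods[0]!]]) shnames
  else if variable_ = "transitionmodels" then
    transitionmodels.foldl (fun acc i =>
      acc ++ [PySem.Str.join "" [i, "_", timemodels[0]!, "_", PySem.Int.toStr vls[0]!, "_", preprocessingmethods[0]!]]) shnames
  else if variable_ = "vls" then
    vls.foldl (fun acc i =>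
      acc ++ [PySem.Str.join "" [transitionmodels[0]!, "_", timemodels[0]!, "_", PySem.Int.toStr i, "_", preprocessingmethods[0]!]]) shnames
  else if variable_ = "preprocessingmethods" then
    preprocessingmethods.foldl (fun acc i =>
      acc ++ [PySem.Str.join "" [transitionmodels[0]!, "_", timemodels[0]!, "_", PySem.Int.toStr vls[0]!, "_", i]]) shnames
  else shnames

-- ===== PORT B =====
-- B-side helper: the option table (Python dict → PySem.Dict as an association list)
def pvOptions : PySem.Dict String (List String) :=
  PySem.Dict.ofList
    [("transitionmodels", ["conv_lstm"]),
     ("timemodels", ["ResNet", "dt", "rf"]),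
     ("vls", ["15", "30"]),
     ("preprocessingmethods", ["last", "ed"])]

def pvOrder : List String := ["transitionmodels", "timemodels", "vls", "preprocessingmethods"]

def createsheetname_alt (variable_ : String) : List String :=
  match PySem.Dict.get? pvOptions variable_ with
  | none => []
  | some opts =>
      opts.map (fun opt =>
        PySem.Str.join "_"
          (pvOrder.map (fun k =>
            if k = variable_ then opt else ((PySem.Dict.get? pvOptions k).getD [])[0]!)))

-- ===== PRECONDITION & SPEC =====
def Spec_createsheetname (variable_ : String) (out : List String) : Prop := out = createsheetname_alt variable_
instance (variable_ : String) (out : List String) : Decidable (Spec_createsheetname variable_ out) := by unfold Spec_createsheetname; infer_instance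

-- ===== CLAIM (what is proved, stated in full; the proofs are below) =====
def Claim_equal_createsheetname : Prop := ∀ (variable_ : String), Dom_createsheetname variable_ → Spec_createsheetname variable_ (createsheetname variable_)

-- ===== LEMMAS AND PROOFS =====

-- ===== VERDICT (by name: the statement is the Claim_ definition above) =====
theorem createsheetname_spec : Claim_equal_createsheetname := by
  intro v _
  unfold Spec_createsheetname
  by_cases h1 : v = "timemodels"
  · subst h1; decide
  by_cases h2 : v = "transitionmodels"
  · subst h2; decide
  by_cases h3 : v = "vls"
  · subst h3; decide
  by_cases h4 : v = "preprocessingmethods"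
  · subst h4; decide
  · have e : pvOptions = PySem.Dict.mk
        [("transitionmodels", ["conv_lstm"]), ("timemodels", ["ResNet", "dt", "rf"]),
         ("vls", ["15", "30"]), ("preprocessingmethods", ["last", "ed"])] := by decide
    simp [createsheetname, createsheetname_alt, e,
      h1, h2, h3, h4, Ne.symm h1, Ne.symm h2, Ne.symm h3, Ne.symm h4, PySem.Dict.get?]
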